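-- pv_equiv track=rewrite | github.com/tigantic/physics-os | FRONTIER/07_GENOMICS/crispr_guide.py | count_homopolymers
-- ===== SOURCE A (Python) =====
-- def count_homopolymers(sequence: str, min_length: int = 4) -> int:
--     """Count homopolymer runs of at least min_length."""
--     seq = sequence.upper()
--     count = 0
--     current_run = 1
--
--     for i in range(1, len(seq)):
--         if seq[i] == seq[i-1]:
--             current_run += 1
--         else:
--             if current_run >= min_length:
--                 count += 1
--             current_run = 1
--
--     if current_run >= min_length:
--         count += 1
--
--     return count
-- ===== SOURCE B (Python) =====
-- def count_homopolymers(sequence: str, min_length: int = 4) -> int: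
--     """Count homopolymer runs of at least min_length (runs-decomposition version)."""
--     s = sequence.upper()
--     n = len(s)
--     runs = []
--     i = 0
--     while i < n:
--         j = i + 1
--         while j < n and s[j] == s[i]:
--             j += 1
--         runs.append(j - i)
--         i = j
--     return sum(1 for r in runs if r >= min_length)
-- ===== Notes on version B (the rewrite author's own statement) =====
-- stated objective: idiomatic
-- what changed: B splits the sequence into maximal runs with a two-pointer scan and counts the runs of length >= min_length, instead of A's single incremental run counter with a trailing flush.
-- intended difference: On the empty sequence with min_length <= 1, A returns 1 (its current_run counter starts at 1 even though there are no characters) while B returns 0, the intended number of runs in an empty string. — e.g. on count_homopolymers("", 1): A returns 1, B returns 0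
import Mathlib
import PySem

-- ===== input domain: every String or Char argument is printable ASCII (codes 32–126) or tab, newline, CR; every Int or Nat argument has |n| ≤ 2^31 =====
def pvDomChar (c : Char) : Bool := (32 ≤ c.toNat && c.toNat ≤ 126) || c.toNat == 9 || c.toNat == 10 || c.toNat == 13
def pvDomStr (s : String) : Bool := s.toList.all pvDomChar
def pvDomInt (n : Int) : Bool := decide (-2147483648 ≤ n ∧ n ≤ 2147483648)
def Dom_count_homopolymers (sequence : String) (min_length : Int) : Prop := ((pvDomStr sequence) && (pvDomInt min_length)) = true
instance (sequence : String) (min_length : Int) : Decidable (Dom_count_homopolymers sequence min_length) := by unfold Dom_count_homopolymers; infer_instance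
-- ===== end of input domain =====

-- B counts runs of length ≥ min_length via a two-pointer runs decomposition (idiomatic);
-- it differs from A only on the empty sequence with min_length ≤ 1, where A's counter artefact returns 1.

-- ===== PORT A =====
def count_homopolymers (sequence : String) (min_length : Int) : Int :=
  let seq : List Char := (PySem.Str.upper sequence).toList
  let st : Int × Int :=
    (PySem.List.pyRange 1 (seq.length : Int) 1).foldl
      (fun (st : Int × Int) i =>
        if PySem.List.pyGetD seq i ' ' == PySem.List.pyGetD seq (i - 1) ' ' then
          (st.1, st.2 + 1)
        else
          ((if st.2 ≥ min_length then st.1 + 1 else st.1), 1))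
      (0, 1)
  if st.2 ≥ min_length then st.1 + 1 else st.1

-- ===== PORT B =====
-- two-pointer inner while of Source B, transcribed as structural recursion: run length of the
-- current character c so far is `len`; a differing character starts a new run
def pvRunsGo (c : Char) (len : Int) : List Char → List Int
  | [] => [len]
  | d :: rest => if d == c then pvRunsGo c (len + 1) rest else len :: pvRunsGo d 1 rest

def count_homopolymers_alt (sequence : String) (min_length : Int) : Int :=
  let s : List Char := (PySem.Str.upper sequence).toList
  let runs : List Int := match s with
    | [] => []
    | c :: rest => pvRunsGo c 1 rest
  ((runs.filter (fun r => min_length ≤ r)).length : Int)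

-- ===== PRECONDITION & SPEC =====
-- On the empty sequence with min_length ≤ 1, A returns 1 (its current_run counter starts at 1
-- with no characters behind it) while B returns 0, the intended number of runs in an empty string.
def D_count_homopolymers (sequence : String) (min_length : Int) : Prop :=
  sequence = "" ∧ min_length ≤ 1
instance (sequence : String) (min_length : Int) : Decidable (D_count_homopolymers sequence min_length) := by unfold D_count_homopolymers; infer_instance

def Spec_count_homopolymers (sequence : String) (min_length : Int) (out : Int) : Prop :=
  ¬ D_count_homopolymers sequence min_length → out = count_homopolymers_alt sequence min_length
instance (sequence : String) (min_length : Int) (out : Int) : Decidable (Spec_count_homopolymers sequence min_length out) := by unfold Spec_count_homopolymers; infer_instance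

def pvDiffWitness_count_homopolymers : String × Int := ("", 1)
def pvDiffWitnessOut_count_homopolymers : Int × Int := (1, 0)

-- ===== CLAIM (what is proved, stated in full; the proofs are below) =====
def Claim_unchanged_count_homopolymers : Prop := ∀ (sequence : String) (min_length : Int), Dom_count_homopolymers sequence min_length → Spec_count_homopolymers sequence min_length (count_homopolymers sequence min_length)
def Claim_changed_count_homopolymers : Prop := Dom_count_homopolymers (pvDiffWitness_count_homopolymers.1) (pvDiffWitness_count_homopolymers.2) ∧ D_count_homopolymers (pvDiffWitness_count_homopolymers.1) (pvDiffWitness_count_homopolymers.2) ∧ count_homopolymers (pvDiffWitness_count_homopolymers.1) (pvDiffWitness_count_homopolymers.2) = pvDiffWitnessOut_count_homopolymers.1 ∧ count_homopolymers_alt (pvDiffWitness_count_homopolymers.1) (pvDiffWitness_count_homopolymers.2) = pvDiffWitnessOut_count_homopolymers.2 ∧ pvDiffWitnessOut_count_homopolymers.1 ≠ pvDiffWitnessOut_count_homopolymers.2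
def Claim_exact_count_homopolymers : Prop := ∀ (sequence : String) (min_length : Int), Dom_count_homopolymers sequence min_length → D_count_homopolymers sequence min_length → count_homopolymers sequence min_length ≠ count_homopolymers_alt sequence min_length

-- ===== LEMMAS AND PROOFS =====

-- A's loop step, on the pair (previous char, current char)
def pvStepA (m : Int) (st : Int × Int) (p : Char × Char) : Int × Int :=
  if p.2 == p.1 then (st.1, st.2 + 1)
  else ((if st.2 ≥ m then st.1 + 1 else st.1), 1)

def pvFinish (m : Int) (st : Int × Int) : Int :=
  if st.2 ≥ m then st.1 + 1 else st.1

-- the index fold of A's port is the fold of pvStepA over adjacent pairs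
lemma pvMapRange (l : List Char) :
    (PySem.List.pyRange 1 (l.length : Int) 1).map
      (fun i => (PySem.List.pyGetD l (i - 1) ' ', PySem.List.pyGetD l i ' '))
      = l.zip l.tail := by
  apply List.ext_getElem
  · simp [PySem.List.length_pyRange_one]
  · intro k h1 h2
    have hk : k < l.length - 1 := by
      simpa [PySem.List.length_pyRange_one] using h1
    have hkr : k < (PySem.List.pyRange 1 (l.length : Int) 1).length := by
      simpa using h1
    have hr : (PySem.List.pyRange 1 (l.length : Int) 1)[k] = 1 + (k : Int) :=
      PySem.List.getElem_pyRange_one 1 (l.length : Int) k hkr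
    have h0 : PySem.List.pyGetD l ((1 : Int) + k - 1) ' ' = l[k] := by
      rw [show (1 : Int) + k - 1 = ((k : Nat) : Int) by omega, PySem.List.pyGetD_natCast]
      exact List.getD_eq_getElem _ _ (by omega)
    have h1' : PySem.List.pyGetD l ((1 : Int) + k) ' ' = l[k + 1] := by
      rw [show (1 : Int) + k = (((k + 1 : Nat)) : Int) by omega, PySem.List.pyGetD_natCast]
      exact List.getD_eq_getElem _ _ (by omega)
    simp only [List.getElem_map, hr, h0, h1', List.getElem_zip, List.getElem_tail]

-- main invariant: flushing A's fold over adjacent pairs counts exactly B's qualifying runs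
lemma pvLoopEq (m : Int) (rest : List Char) : ∀ (c : Char) (run count : Int),
    pvFinish m (((c :: rest).zip rest).foldl (pvStepA m) (count, run))
      = count + (((pvRunsGo c run rest).filter (fun r => m ≤ r)).length : Int) := by
  induction rest with
  | nil =>
    intro c run count
    simp only [List.zip_nil_right, List.foldl_nil, pvFinish, pvRunsGo, List.filter]
    by_cases h : m ≤ run
    · simp [h, ge_iff_le]
    · simp [h, ge_iff_le]
  | cons d rest ih =>
    intro c run count
    have hz : (c :: d :: rest).zip (d :: rest) = (c, d) :: ((d :: rest).zip rest) := rfl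
    rw [hz, List.foldl_cons]
    by_cases h : d == c
    · have hdc : d = c := by simpa using h
      subst hdc
      have hstep : pvStepA m (count, run) (d, d) = (count, run + 1) := by
        simp [pvStepA]
      rw [hstep, ih d (run + 1) count]
      simp [pvRunsGo]
    · have hne : d ≠ c := by simpa using h
      have hstep : pvStepA m (count, run) (c, d)
          = ((if run ≥ m then count + 1 else count), 1) := by
        simp [pvStepA, h]
      rw [hstep, ih d 1 _]
      by_cases hr : m ≤ run
      · simp [pvRunsGo, hne, hr, ge_iff_le]
        ring
      · simp [pvRunsGo, hne, hr, ge_iff_le]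

lemma pvToListNil (s : String) (h : s.toList = []) : s = "" := by
  have h2 : s.toList = "".toList := by simpa using h
  exact String.toList_inj.mp h2

-- ===== VERDICT (by name: the statement is the Claim_ definition above) =====
theorem count_homopolymers_spec : Claim_unchanged_count_homopolymers := by
  intro sequence m _ hnd
  unfold count_homopolymers count_homopolymers_alt
  simp only []
  set l : List Char := (PySem.Str.upper sequence).toList with hl
  have hfold :
      (PySem.List.pyRange 1 (l.length : Int) 1).foldl
        (fun (st : Int × Int) i =>
          if PySem.List.pyGetD l i ' ' == PySem.List.pyGetD l (i - 1) ' ' then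
            (st.1, st.2 + 1)
          else
            ((if st.2 ≥ m then st.1 + 1 else st.1), 1))
        (0, 1)
      = (l.zip l.tail).foldl (pvStepA m) (0, 1) := by
    rw [← pvMapRange l, List.foldl_map]
    rfl
  rw [hfold]
  cases hc : l with
  | nil =>
    have hseq : sequence = "" := by
      apply pvToListNil
      have : (PySem.Chars.upper sequence.toList) = [] := by
        rw [← PySem.Str.toList_upper, ← hl, hc]
      simpa [PySem.Chars.upper] using this
    have hm : ¬ m ≤ 1 := fun h => hnd ⟨hseq, h⟩
    simp
    omega
  | cons c rest =>
    have := pvLoopEq m rest c 1 0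
    rw [hc] at *
    simpa [pvFinish] using this

theorem count_homopolymers_changed : Claim_changed_count_homopolymers := by
  unfold Claim_changed_count_homopolymers; decide

theorem count_homopolymers_tight : Claim_exact_count_homopolymers := by
  intro sequence m _ hd
  obtain ⟨hs, hm⟩ := hd
  subst hs
  have hl : (PySem.Str.upper "").toList = [] := by decide
  unfold count_homopolymers count_homopolymers_alt
  rw [hl]
  simp
  omega
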